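-- pv_equiv track=rewrite | github.com/koii-network/prometheus-beta | src/sentence_case.py | convert_to_sentence_case
-- ===== SOURCE A (Python) =====
-- def convert_to_sentence_case(text: str) -> str:
--     """
--     Convert a string to sentence case.
--
--     Sentence case capitalizes the first non-whitespace character
--     and ensures other non-whitespace characters are lowercase
--     while preserving the original whitespace.
--
--     Args:
--         text (str): The input string to convert to sentence case.
--
--     Returns:
--         str: The input string converted to sentence case.
--
--     Raises:
--         TypeError: If the input is not a string.
--
--     Examples:
--         >>> convert_to_sentence_case("HELLO WORLD")
--         'Hello world'
--         >>> convert_to_sentence_case("hello WORLD")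
--         'Hello world'
--         >>> convert_to_sentence_case("")
--         ''
--         >>> convert_to_sentence_case(" HELLO ")
--         ' Hello '
--     """
--     # Check if input is a string
--     if not isinstance(text, str):
--         raise TypeError("Input must be a string")
--
--     # Handle empty string case
--     if not text:
--         return text
--
--     # Find the first non-whitespace character
--     first_non_whitespace_chars = [(i, char) for i, char in enumerate(text) if not char.isspace()]
--
--     # If no non-whitespace characters, return original string
--     if not first_non_whitespace_chars:
--         return text
--
--     # Convert first non-whitespace character to uppercase
--     first_non_ws_index, first_non_ws_char = first_non_whitespace_chars[0]
--     modified_text = list(text)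
--     modified_text[first_non_ws_index] = first_non_ws_char.upper()
--
--     # Convert other non-whitespace characters to lowercase
--     for i, (idx, char) in enumerate(first_non_whitespace_chars[1:], start=1):
--         modified_text[idx] = char.lower()
--
--     return ''.join(modified_text)
-- ===== SOURCE B (Python) =====
-- def convert_to_sentence_case(text: str) -> str:
--     """Sentence case: lower the whole string once, then splice in the
--     uppercased first non-whitespace character at its position."""
--     if not isinstance(text, str):
--         raise TypeError("Input must be a string")
--     lowered = text.lower()
--     for j, c in enumerate(text):
--         if not c.isspace():
--             return lowered[:j] + c.upper() + lowered[j + 1:]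
--     return text
-- ===== Notes on version B (the rewrite author's own statement) =====
-- stated objective: simpler
-- what changed: A collects all non-whitespace (index,char) pairs and mutates a char list entry by entry; B lowercases the whole string once (C-level str.lower) and splices the uppercased first non-whitespace character in at its index, stopping the scan there.
import Mathlib
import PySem

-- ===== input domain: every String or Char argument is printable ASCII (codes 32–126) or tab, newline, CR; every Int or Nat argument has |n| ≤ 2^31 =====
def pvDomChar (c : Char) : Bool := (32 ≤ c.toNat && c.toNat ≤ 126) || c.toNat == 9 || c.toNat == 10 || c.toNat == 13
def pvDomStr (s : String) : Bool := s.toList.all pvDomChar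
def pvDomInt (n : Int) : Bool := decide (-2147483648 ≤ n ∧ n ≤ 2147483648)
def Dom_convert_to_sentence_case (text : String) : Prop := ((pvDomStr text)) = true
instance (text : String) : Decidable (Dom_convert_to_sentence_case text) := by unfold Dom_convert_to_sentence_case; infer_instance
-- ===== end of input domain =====

-- B lowercases the whole string once and splices in the uppercased first non-whitespace
-- character, instead of A's collect-all-pairs-and-mutate loop (objective: simpler).

-- ===== PORT A =====
-- 'modified_text[idx] = …' on an index produced by enumerate (always ≥ 0): List.set at i.toNat is exact.
def convert_to_sentence_case (text : String) : String :=
  if text.toList = [] then text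
  else
    let fnw := (PySem.List.enumerate text.toList 0).filter (fun p => !(PySem.Chars.isspace p.2))
    match fnw with
    | [] => text
    | (i0, c0) :: rest =>
        let m0 := text.toList.set i0.toNat (PySem.Chars.upperChar c0)
        String.ofList (rest.foldl (fun acc p => acc.set p.1.toNat (PySem.Chars.lowerChar p.2)) m0)

-- ===== PORT B =====
-- the 'for j, c in enumerate(text)' scan with early return; lowered[:j] / lowered[j+1:] on
-- nonnegative in-range bounds are exactly List.take j / List.drop (j+1)
def altLoop (lowered : List Char) (j : Nat) : List Char → Option (List Char)
  | [] => none
  | c :: rest =>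
      if !(PySem.Chars.isspace c) then
        some (lowered.take j ++ [PySem.Chars.upperChar c] ++ lowered.drop (j + 1))
      else altLoop lowered (j + 1) rest

def convert_to_sentence_case_alt (text : String) : String :=
  let lowered := PySem.Chars.lower text.toList
  match altLoop lowered 0 text.toList with
  | some cs => String.ofList cs
  | none => text

-- ===== PRECONDITION & SPEC =====
def Spec_convert_to_sentence_case (text : String) (out : String) : Prop := out = convert_to_sentence_case_alt text
instance (text : String) (out : String) : Decidable (Spec_convert_to_sentence_case text out) := by unfold Spec_convert_to_sentence_case; infer_instance

-- ===== CLAIM (what is proved, stated in full; the proofs are below) =====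
def Claim_equal_convert_to_sentence_case : Prop := ∀ (text : String), Dom_convert_to_sentence_case text → Spec_convert_to_sentence_case text (convert_to_sentence_case text)

-- ===== LEMMAS AND PROOFS =====

-- str.lower leaves whitespace characters unchanged (isupper is 'A'..'Z' only)
theorem lower_fix_of_space (c : Char) (h : PySem.Chars.isspace c = true) :
    PySem.Chars.lowerChar c = c := by
  simp [PySem.Chars.isspace] at h
  have : PySem.Chars.isupper c = false := by
    simp [PySem.Chars.isupper, Char.le_def, UInt32.le_iff_toNat_le]
    intro h1
    change 65 ≤ c.toNat at h1
    omega
  simp [PySem.Chars.lowerChar, this]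

theorem map_lower_of_all_space (ws : List Char) (h : ws.all PySem.Chars.isspace = true) :
    ws.map PySem.Chars.lowerChar = ws := by
  rw [List.map_congr_left (g := id), List.map_id]
  intro a ha
  exact lower_fix_of_space a (by simpa using List.all_eq_true.mp h a ha)

theorem split_ws (cs : List Char) :
    cs.all PySem.Chars.isspace = true ∨
      ∃ ws c rs, cs = ws ++ c :: rs ∧ ws.all PySem.Chars.isspace = true ∧
        PySem.Chars.isspace c = false := by
  induction cs with
  | nil => exact Or.inl rfl
  | cons c rs ih =>
    by_cases hc : PySem.Chars.isspace c = true
    · rcases ih with h | ⟨ws, d, ds, rfl, hws, hd⟩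
      · exact Or.inl (by simp [hc, h])
      · exact Or.inr ⟨c :: ws, d, ds, rfl, by simp [hc, hws], hd⟩
    · exact Or.inr ⟨[], c, rs, rfl, rfl, by simpa using hc⟩

theorem altLoop_all_space (ws : List Char) (h : ws.all PySem.Chars.isspace = true) :
    ∀ L j, altLoop L j ws = none := by
  induction ws with
  | nil => intro L j; rfl
  | cons c rs ih =>
    intro L j
    simp only [List.all_cons, Bool.and_eq_true] at h
    simp [altLoop, h.1, ih h.2]

theorem altLoop_found (ws : List Char) (h : ws.all PySem.Chars.isspace = true)
    (c : Char) (hc : PySem.Chars.isspace c = false) (rs L : List Char) :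
    ∀ j, altLoop L j (ws ++ c :: rs) =
      some (L.take (j + ws.length) ++ [PySem.Chars.upperChar c] ++ L.drop (j + ws.length + 1)) := by
  induction ws with
  | nil => intro j; simp [altLoop, hc]
  | cons d ds ih =>
    intro j
    simp only [List.all_cons, Bool.and_eq_true] at h
    simp only [List.cons_append, altLoop, h.1, Bool.not_true, Bool.false_eq_true, if_false]
    rw [ih h.2 (j + 1)]
    simp only [List.length_cons]
    have e1 : j + 1 + ds.length = j + (ds.length + 1) := by omega
    rw [e1]

theorem filter_enumerate_space (ws : List Char) (h : ws.all PySem.Chars.isspace = true) :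
    ∀ (tail : List Char) (n : Int),
      (PySem.List.enumerate (ws ++ tail) n).filter (fun p => !(PySem.Chars.isspace p.2)) =
        (PySem.List.enumerate tail (n + ws.length)).filter (fun p => !(PySem.Chars.isspace p.2)) := by
  induction ws with
  | nil => intro tail n; simp
  | cons c rs ih =>
    intro tail n
    simp only [List.all_cons, Bool.and_eq_true] at h
    rw [List.cons_append, PySem.List.enumerate_cons, List.filter_cons]
    simp only [h.1, Bool.not_true, Bool.false_eq_true, if_false]
    rw [ih h.2 tail (n + 1)]
    have e : n + 1 + (rs.length : Int) = n + ((c :: rs).length : Int) := by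
      push_cast [List.length_cons]; ring
    rw [e]

theorem foldl_set_lower (rs : List Char) :
    ∀ (p : List Char),
      ((PySem.List.enumerate rs (p.length : Int)).filter
          (fun q => !(PySem.Chars.isspace q.2))).foldl
        (fun acc q => acc.set q.1.toNat (PySem.Chars.lowerChar q.2)) (p ++ rs) =
      p ++ rs.map PySem.Chars.lowerChar := by
  induction rs with
  | nil => intro p; simp
  | cons c cs ih =>
    intro p
    rw [PySem.List.enumerate_cons, List.filter_cons]
    by_cases hc : PySem.Chars.isspace c = true
    · simp only [hc, Bool.not_true, Bool.false_eq_true, if_false]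
      have h1 : p ++ c :: cs = (p ++ [c]) ++ cs := by simp
      have h2 : ((p.length : Int) + 1) = ((p ++ [c]).length : Int) := by simp
      rw [h1, h2, ih (p ++ [c])]
      simp [lower_fix_of_space c hc]
    · simp only [hc, Bool.not_false, if_true, List.foldl_cons]
      have hset : (p ++ c :: cs).set ((p.length : Int)).toNat (PySem.Chars.lowerChar c) =
          (p ++ [PySem.Chars.lowerChar c]) ++ cs := by
        simp [Int.toNat_natCast]
      rw [hset]
      have h2 : ((p.length : Int) + 1) = (((p ++ [PySem.Chars.lowerChar c]).length : Int)) := by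
        simp
      rw [h2, ih (p ++ [PySem.Chars.lowerChar c])]
      simp

theorem ports_agree (text : String) :
    convert_to_sentence_case text = convert_to_sentence_case_alt text := by
  rcases split_ws text.toList with hall | ⟨ws, c, rs, hsplit, hws, hc⟩
  · -- all whitespace (includes the empty string): both return text
    simp only [convert_to_sentence_case, convert_to_sentence_case_alt]
    rw [altLoop_all_space _ hall]
    by_cases hnil : text.toList = []
    · simp [hnil]
    · simp only [hnil, if_false]
      have : text.toList = text.toList ++ [] := by simp
      rw [this, filter_enumerate_space _ hall []]
      simp
  · -- ws ++ c :: rs, c the first non-whitespace character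
    simp only [convert_to_sentence_case, convert_to_sentence_case_alt]
    have hnil : text.toList ≠ [] := by simp [hsplit]
    simp only [hnil, if_false]
    rw [hsplit, filter_enumerate_space _ hws, PySem.List.enumerate_cons, List.filter_cons]
    simp only [hc, Bool.not_false, if_true, zero_add]
    rw [altLoop_found _ hws _ hc]
    have hset : (ws ++ c :: rs).set ((ws.length : Int)).toNat (PySem.Chars.upperChar c) =
        (ws ++ [PySem.Chars.upperChar c]) ++ rs := by
      simp [Int.toNat_natCast]
    have h2 : ((ws.length : Int) + 1) = (((ws ++ [PySem.Chars.upperChar c]).length : Int)) := by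
      simp
    rw [hset, h2, foldl_set_lower rs (ws ++ [PySem.Chars.upperChar c])]
    have hlow : PySem.Chars.lower (ws ++ c :: rs) =
        ws ++ PySem.Chars.lowerChar c :: rs.map PySem.Chars.lowerChar := by
      simp [PySem.Chars.lower, map_lower_of_all_space ws hws]
    rw [hlow]
    have htake : (ws ++ PySem.Chars.lowerChar c :: rs.map PySem.Chars.lowerChar).take
        (0 + ws.length) = ws := by
      simp
    have hdrop : (ws ++ PySem.Chars.lowerChar c :: rs.map PySem.Chars.lowerChar).drop
        (0 + ws.length + 1) = rs.map PySem.Chars.lowerChar := by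
      have : ws ++ PySem.Chars.lowerChar c :: rs.map PySem.Chars.lowerChar =
          (ws ++ [PySem.Chars.lowerChar c]) ++ rs.map PySem.Chars.lowerChar := by simp
      rw [this]
      simp
    rw [htake, hdrop]

-- ===== VERDICT (by name: the statement is the Claim_ definition above) =====
theorem convert_to_sentence_case_spec : Claim_equal_convert_to_sentence_case := by
  intro text _
  unfold Spec_convert_to_sentence_case
  exact ports_agree text
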